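-- pv_equiv track=rewrite | github.com/masc3796/ecea5385_cryptopals | set1_challenge3.py | byte_cipher_decode
-- ===== SOURCE A (Python) =====
-- def byte_cipher_decode(s, key):
--     assert len(key) == 1
--     key = key[0]
--
--     ret = [None]*len(s)
--     for i in range(len(s)):
--         try:
--             ret[i] = s[i] ^ key
--         except:
--             ret[i] = 0x00
--
--     try:
--         ret = bytearray(ret).decode("ascii")
--         return ret
--     except:
--         return ""
-- ===== SOURCE B (Python) =====
-- def byte_cipher_decode(s, key):
--     (k,) = key
--     chars = []
--     for c in s:
--         v = c ^ k
--         if v < 0 or v > 127: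
--             return ""
--         chars.append(chr(v))
--     return "".join(chars)
-- ===== Notes on version B (the rewrite author's own statement) =====
-- stated objective: simpler
-- what changed: Single pass that XORs, validates the 0..127 range inline and returns '' immediately on the first invalid byte, instead of building a full list and round-tripping it through bytearray().decode('ascii') under try/except.
import Mathlib
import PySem

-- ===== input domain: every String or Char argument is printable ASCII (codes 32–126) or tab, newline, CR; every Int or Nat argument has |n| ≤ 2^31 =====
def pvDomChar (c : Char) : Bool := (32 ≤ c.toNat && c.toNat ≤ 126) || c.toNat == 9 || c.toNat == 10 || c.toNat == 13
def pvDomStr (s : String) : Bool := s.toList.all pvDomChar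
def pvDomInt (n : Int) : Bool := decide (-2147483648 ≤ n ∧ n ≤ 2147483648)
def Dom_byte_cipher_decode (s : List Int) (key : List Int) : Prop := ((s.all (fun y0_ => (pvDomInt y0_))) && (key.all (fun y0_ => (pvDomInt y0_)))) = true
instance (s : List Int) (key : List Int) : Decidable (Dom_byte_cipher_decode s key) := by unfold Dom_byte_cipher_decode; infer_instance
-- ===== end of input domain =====

-- B replaces A's list-build + bytearray().decode("ascii") round-trip by one pass that XORs,
-- range-checks inline and returns "" at the first invalid byte (objective: simpler).


-- ===== PORT A =====
-- assert len(key) == 1 raises outside Pre_; key = key[0]; the per-index try/except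
-- writes s[i]^key (or 0 on IndexError, which cannot fire for i in range(len(s)));
-- bytearray(ret) raises unless every byte is in 0..255, .decode("ascii") unless ≤ 127.
def byte_cipher_decode (s : List Int) (key : List Int) : String :=
  match PySem.List.pyGet? key 0 with
  | none => ""   -- unreachable: the assert (len(key) == 1) has already raised; outside Pre_
  | some k =>
    let ret : List Int :=
      (PySem.List.pyRange 0 (s.length : Int) 1).map (fun i =>
        match PySem.List.pyGet? s i with
        | some c => Int.xor c k
        | none   => 0)
    if ret.all (fun v => decide (0 ≤ v) && decide (v < 256)) then
      if ret.all (fun v => decide (v < 128)) then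
        String.mk (ret.map (fun v => Char.ofNat v.toNat))
      else ""
    else ""

-- ===== PORT B =====
-- Source B's loop: XOR, validate 0..127 inline, early-return "" on the first bad byte.
def pvAltLoop (k : Int) : List Int → List Char → String
  | [], acc => String.mk acc.reverse
  | c :: rest, acc =>
    let v := Int.xor c k
    if v < 0 ∨ 127 < v then "" else pvAltLoop k rest (Char.ofNat v.toNat :: acc)

def byte_cipher_decode_alt (s : List Int) (key : List Int) : String :=
  match key with
  | [k] => pvAltLoop k s []
  | _ => ""   -- '(k,) = key' raises here; outside Pre_

-- ===== PRECONDITION & SPEC =====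
-- A's 'assert len(key) == 1' raises AssertionError for any other key length.
def Pre_byte_cipher_decode (s : List Int) (key : List Int) : Prop := key.length = 1
instance (s : List Int) (key : List Int) : Decidable (Pre_byte_cipher_decode s key) := by unfold Pre_byte_cipher_decode; infer_instance
def pvWitness_byte_cipher_decode : List Int × List Int := ([72, 105], [3])

def Spec_byte_cipher_decode (s : List Int) (key : List Int) (out : String) : Prop := out = byte_cipher_decode_alt s key
instance (s : List Int) (key : List Int) (out : String) : Decidable (Spec_byte_cipher_decode s key out) := by unfold Spec_byte_cipher_decode; infer_instance

-- ===== CLAIM (what is proved, stated in full; the proofs are below) =====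
def Claim_equal_byte_cipher_decode : Prop := ∀ (s : List Int) (key : List Int), Dom_byte_cipher_decode s key → Pre_byte_cipher_decode s key → Spec_byte_cipher_decode s key (byte_cipher_decode s key)

-- ===== LEMMAS AND PROOFS =====

-- A's index loop over range(len(s)) builds exactly the element-wise XOR of s.
theorem pvRetEq (s : List Int) (k : Int) :
    (PySem.List.pyRange 0 (s.length : Int) 1).map (fun i =>
        match PySem.List.pyGet? s i with
        | some c => Int.xor c k
        | none   => 0) = s.map (fun c => Int.xor c k) := by
  rw [PySem.List.pyRange_one]
  simp only [sub_zero, Int.toNat_natCast, List.map_map]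
  apply List.ext_getElem
  · simp
  · intro j h1 h2
    simp only [List.getElem_map, List.getElem_range, Function.comp_apply]
    rw [zero_add, PySem.List.pyGet?_natCast]
    simp at h1
    simp [List.getElem?_eq_getElem h1]

-- characterisation of B's loop
theorem pvAltLoop_eq (k : Int) (s : List Int) (acc : List Char) :
    pvAltLoop k s acc =
      if (s.map (fun c => Int.xor c k)).all (fun v => decide (0 ≤ v) && decide (v < 128))
      then String.mk (acc.reverse ++ (s.map (fun c => Int.xor c k)).map (fun v => Char.ofNat v.toNat))
      else "" := by
  induction s generalizing acc with
  | nil => simp [pvAltLoop]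
  | cons c rest ih =>
    simp only [pvAltLoop, List.map_cons, List.all_cons]
    by_cases hc : Int.xor c k < 0 ∨ 127 < Int.xor c k
    · rw [if_pos hc]
      have hb : (decide (0 ≤ Int.xor c k) && decide (Int.xor c k < 128)) = false := by
        simp only [Bool.and_eq_false_iff, decide_eq_false_iff_not]
        omega
      rw [hb]
      simp
    · rw [if_neg hc, ih]
      have hb : (decide (0 ≤ Int.xor c k) && decide (Int.xor c k < 128)) = true := by
        simp only [Bool.and_eq_true, decide_eq_true_eq]
        omega
      rw [hb, Bool.true_and]
      split_ifs with h
      · simp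
      · rfl

-- ===== VERDICT (by name: the statement is the Claim_ definition above) =====
theorem byte_cipher_decode_spec : Claim_equal_byte_cipher_decode := by
  intro s key _hDom hPre
  unfold Pre_byte_cipher_decode at hPre
  obtain ⟨k, rfl⟩ : ∃ k, key = [k] := by
    match key, hPre with
    | [k], _ => exact ⟨k, rfl⟩
  unfold Spec_byte_cipher_decode byte_cipher_decode byte_cipher_decode_alt
  simp only [PySem.List.pyGet?_zero_cons]
  rw [pvRetEq, pvAltLoop_eq]
  by_cases hall : (s.map (fun c => Int.xor c k)).all (fun v => decide (0 ≤ v) && decide (v < 128)) = true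
  · have h256 : (s.map (fun c => Int.xor c k)).all (fun v => decide (0 ≤ v) && decide (v < 256)) = true := by
      simp only [List.all_eq_true, decide_eq_true_eq, Bool.and_eq_true] at *
      intro v hv; have := hall v hv; omega
    have h128 : (s.map (fun c => Int.xor c k)).all (fun v => decide (v < 128)) = true := by
      simp only [List.all_eq_true, decide_eq_true_eq, Bool.and_eq_true] at *
      intro v hv; exact (hall v hv).2
    simp [h256, h128, hall]
  · rw [if_neg hall]
    by_cases h256 : (s.map (fun c => Int.xor c k)).all (fun v => decide (0 ≤ v) && decide (v < 256)) = true
    · rw [if_pos h256]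
      rw [if_neg]
      intro h128
      apply hall
      simp only [List.all_eq_true, decide_eq_true_eq, Bool.and_eq_true] at *
      intro v hv
      exact ⟨(h256 v hv).1, by have := h128 v hv; omega⟩
    · rw [if_neg h256]
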